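-- pv_equiv track=rewrite | github.com/yanivassf-lab/brain-dashboard | brain_dashboard/atlas_utils.py | get_aparc_to_destrieux_mapping
-- ===== SOURCE A (Python) =====
-- def get_aparc_to_destrieux_mapping(aparc_label):
--     if aparc_label in ['BrainSegVol', 'BrainSegVolNotVent', 'eTIV',
--                        'lhCortexVol', 'rhCortexVol', 'CortexVol',
--                        'lhCerebralWhiteMatterVol', 'rhCerebralWhiteMatterVol',
--                        'CerebralWhiteMatterVol', 'SubCortGrayVol', 'TotalGrayVol',
--                        'SupraTentorialVol', 'SupraTentorialVolNotVent', 'MaskVol',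
--                        'BrainSegVol-to-eTIV', 'MaskVol-to-eTIV', 'lhSurfaceHoles',
--                        'rhSurfaceHoles', 'SurfaceHoles', 'EstimatedTotalIntraCranialVol']:
--         return 0  # No mapping for these summary measures
--
--     # Comprehensive mapping from FreeSurfer aparc to Destrieux indices
--     # Destrieux has 74 regions per hemisphere (indices 0-73 for left, 74-147 for right)
--     # Index 0 is typically "unknown" or medial wall
--
--     aparc_to_destrieux = {
--         # LEFT HEMISPHERE (indices 1-73)
--         # Frontal Lobe
--         'lh_superiorfrontal': 28,  # G_front_sup
--         'lh_rostralmiddlefrontal': 27,  # G_front_middle (rostral part)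
--         'lh_caudalmiddlefrontal': 27,  # G_front_middle (caudal part)
--         'lh_parsopercularis': 24,  # G_front_inf-Opercular
--         'lh_parstriangularis': 26,  # G_front_inf-Triangul
--         'lh_parsorbitalis': 25,  # G_front_inf-Orbital
--         'lh_lateralorbitofrontal': 36,  # G_orbital
--         'lh_medialorbitofrontal': 43,  # G_rectus + G_subcallosal
--         'lh_precentral': 41,  # G_precentral
--         'lh_paracentral': 17,  # G_and_S_paracentral
--         'lh_frontalpole': 19,  # G_and_S_transv_frontopol
--
--         # Parietal Lobe
--         'lh_superiorparietal': 39,  # G_parietal_sup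
--         'lh_inferiorparietal': 37,  # G_pariet_inf-Angular
--         'lh_supramarginal': 38,  # G_pariet_inf-Supramar
--         'lh_postcentral': 40,  # G_postcentral
--         'lh_precuneus': 42,  # G_precuneus
--
--         # Temporal Lobe
--         'lh_superiortemporal': 46,  # G_temp_sup-Lateral
--         'lh_middletemporal': 50,  # G_temporal_middle
--         'lh_inferiortemporal': 49,  # G_temporal_inf
--         'lh_bankssts': 45,  # G_temp_sup-G_T_transv (banks of STS)
--         'lh_fusiform': 33,  # G_oc-temp_lat-fusifor
--         'lh_transversetemporal': 45,  # G_temp_sup-G_T_transv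
--         'lh_entorhinal': 21,  # S_collat_transv_post (approximate)
--         'lh_temporalpole': 47,  # G_temp_sup-Plan_polar
--         'lh_parahippocampal': 35,  # G_oc-temp_med-Parahip
--
--         # Occipital Lobe
--         'lh_lateraloccipital': 31,  # G_occipital_middle
--         'lh_lingual': 34,  # G_oc-temp_med-Lingual
--         'lh_cuneus': 23,  # G_cuneus
--         'lh_pericalcarine': 32,  # G_occipital_sup + S_calcarine
--
--         # Cingulate
--         'lh_rostralanteriorcingulate': 20,  # G_and_S_cingul-Ant
--         'lh_caudalanteriorcingulate': 20,  # G_and_S_cingul-Ant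
--         'lh_posteriorcingulate': 22,  # G_and_S_cingul-Mid-Post
--         'lh_isthmuscingulate': 22,  # G_and_S_cingul-Mid-Post
--
--         # Insula
--         'lh_insula': 29,  # G_Ins_lg_and_S_cent_ins + G_insular_short
--     }
--
--     # Add right hemisphere by adding 74 to left indices
--     for key, value in list(aparc_to_destrieux.items()):
--         if key.startswith('lh_'):
--             rh_key = key.replace('lh_', 'rh_')
--             aparc_to_destrieux[rh_key] = value + 74
--
--     return aparc_to_destrieux[aparc_label] if aparc_label in aparc_to_destrieux else 0
-- ===== SOURCE B (Python) =====
-- # Alternative: inverted table of (value, [bare names]) groups scanned linearly,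
-- # with the hemisphere prefix/offset handled by a small prefix loop at query time;
-- # no combined 70-entry dict is ever built.
--
-- _GROUPS = [
--     (28, ['superiorfrontal']),
--     (27, ['rostralmiddlefrontal', 'caudalmiddlefrontal']),
--     (24, ['parsopercularis']),
--     (26, ['parstriangularis']),
--     (25, ['parsorbitalis']),
--     (36, ['lateralorbitofrontal']),
--     (43, ['medialorbitofrontal']),
--     (41, ['precentral']),
--     (17, ['paracentral']),
--     (19, ['frontalpole']),
--     (39, ['superiorparietal']),
--     (37, ['inferiorparietal']),
--     (38, ['supramarginal']),
--     (40, ['postcentral']),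
--     (42, ['precuneus']),
--     (46, ['superiortemporal']),
--     (50, ['middletemporal']),
--     (49, ['inferiortemporal']),
--     (45, ['bankssts', 'transversetemporal']),
--     (33, ['fusiform']),
--     (21, ['entorhinal']),
--     (47, ['temporalpole']),
--     (35, ['parahippocampal']),
--     (31, ['lateraloccipital']),
--     (34, ['lingual']),
--     (23, ['cuneus']),
--     (32, ['pericalcarine']),
--     (20, ['rostralanteriorcingulate', 'caudalanteriorcingulate']),
--     (22, ['posteriorcingulate', 'isthmuscingulate']),
--     (29, ['insula']),
-- ]
--
-- _PREFIXES = [('lh_', 0), ('rh_', 74)]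
--
--
-- def get_aparc_to_destrieux_mapping(aparc_label):
--     for prefix, offset in _PREFIXES:
--         if aparc_label.startswith(prefix):
--             bare = aparc_label[len(prefix):]
--             for value, names in _GROUPS:
--                 if bare in names:
--                     return value + offset
--             return 0
--     return 0
-- ===== Notes on version B (the rewrite author's own statement) =====
-- stated objective: alternative
-- what changed: B replaces the per-call build of a combined 70-entry lh/rh dict with an inverted static table of (value, [bare region names]) groups scanned linearly, stripping the lh_/rh_ prefix and adding the +74 right-hemisphere offset at query time via a small prefix loop; the summary-measure list disappears since those labels simply miss the table.
import Mathlib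
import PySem

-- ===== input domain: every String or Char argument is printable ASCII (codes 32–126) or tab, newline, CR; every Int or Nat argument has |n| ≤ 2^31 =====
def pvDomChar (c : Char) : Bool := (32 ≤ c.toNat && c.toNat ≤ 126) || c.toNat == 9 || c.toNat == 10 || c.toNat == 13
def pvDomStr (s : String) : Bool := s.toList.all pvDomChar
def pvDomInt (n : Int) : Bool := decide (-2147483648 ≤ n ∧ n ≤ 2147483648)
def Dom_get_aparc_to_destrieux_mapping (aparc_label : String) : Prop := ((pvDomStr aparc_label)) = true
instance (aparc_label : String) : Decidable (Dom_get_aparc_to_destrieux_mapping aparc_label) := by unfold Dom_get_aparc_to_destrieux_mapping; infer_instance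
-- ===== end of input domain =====

-- B replaces the per-call build of a combined lh/rh dict by a static inverted table of
-- (value, bare-name group) pairs scanned linearly, with the lh_/rh_ prefix and the +74
-- right-hemisphere offset handled by a small prefix loop at query time (objective: alternative).

-- ===== PORT A =====
def pvSummaryMeasures : List String := ["BrainSegVol", "BrainSegVolNotVent", "eTIV", "lhCortexVol", "rhCortexVol", "CortexVol", "lhCerebralWhiteMatterVol", "rhCerebralWhiteMatterVol", "CerebralWhiteMatterVol", "SubCortGrayVol", "TotalGrayVol", "SupraTentorialVol", "SupraTentorialVolNotVent", "MaskVol", "BrainSegVol-to-eTIV", "MaskVol-to-eTIV", "lhSurfaceHoles", "rhSurfaceHoles", "SurfaceHoles", "EstimatedTotalIntraCranialVol"]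

def pvAparcToDestrieuxBase : PySem.Dict String Int := PySem.Dict.ofList
  [("lh_superiorfrontal", 28),
   ("lh_rostralmiddlefrontal", 27),
   ("lh_caudalmiddlefrontal", 27),
   ("lh_parsopercularis", 24),
   ("lh_parstriangularis", 26),
   ("lh_parsorbitalis", 25),
   ("lh_lateralorbitofrontal", 36),
   ("lh_medialorbitofrontal", 43),
   ("lh_precentral", 41),
   ("lh_paracentral", 17),
   ("lh_frontalpole", 19),
   ("lh_superiorparietal", 39),
   ("lh_inferiorparietal", 37),
   ("lh_supramarginal", 38),
   ("lh_postcentral", 40),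
   ("lh_precuneus", 42),
   ("lh_superiortemporal", 46),
   ("lh_middletemporal", 50),
   ("lh_inferiortemporal", 49),
   ("lh_bankssts", 45),
   ("lh_fusiform", 33),
   ("lh_transversetemporal", 45),
   ("lh_entorhinal", 21),
   ("lh_temporalpole", 47),
   ("lh_parahippocampal", 35),
   ("lh_lateraloccipital", 31),
   ("lh_lingual", 34),
   ("lh_cuneus", 23),
   ("lh_pericalcarine", 32),
   ("lh_rostralanteriorcingulate", 20),
   ("lh_caudalanteriorcingulate", 20),
   ("lh_posteriorcingulate", 22),
   ("lh_isthmuscingulate", 22),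
   ("lh_insula", 29)]

-- the loop "for key, value in list(d.items()): if key.startswith('lh_'): d[key.replace('lh_','rh_')] = value + 74"
def pvAparcToDestrieuxFull : PySem.Dict String Int :=
  pvAparcToDestrieuxBase.items.foldl
    (fun acc kv =>
      if PySem.Str.startswith kv.1 "lh_" then
        acc.insert (PySem.Str.replace kv.1 "lh_" "rh_") (kv.2 + 74)
      else acc)
    pvAparcToDestrieuxBase

-- "aparc_to_destrieux[aparc_label] if aparc_label in aparc_to_destrieux else 0": one lookup, 0 on a miss
def get_aparc_to_destrieux_mapping (aparc_label : String) : Int :=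
  if aparc_label ∈ pvSummaryMeasures then 0
  else
    match pvAparcToDestrieuxFull.get? aparc_label with
    | some v => v
    | none => 0

-- ===== PORT B =====
-- static inverted table: (Destrieux value, bare region names sharing it)
def pvGroups : List (Int × List String) :=
  [(28, ["superiorfrontal"]),
   (27, ["rostralmiddlefrontal", "caudalmiddlefrontal"]),
   (24, ["parsopercularis"]),
   (26, ["parstriangularis"]),
   (25, ["parsorbitalis"]),
   (36, ["lateralorbitofrontal"]),
   (43, ["medialorbitofrontal"]),
   (41, ["precentral"]),
   (17, ["paracentral"]),
   (19, ["frontalpole"]),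
   (39, ["superiorparietal"]),
   (37, ["inferiorparietal"]),
   (38, ["supramarginal"]),
   (40, ["postcentral"]),
   (42, ["precuneus"]),
   (46, ["superiortemporal"]),
   (50, ["middletemporal"]),
   (49, ["inferiortemporal"]),
   (45, ["bankssts", "transversetemporal"]),
   (33, ["fusiform"]),
   (21, ["entorhinal"]),
   (47, ["temporalpole"]),
   (35, ["parahippocampal"]),
   (31, ["lateraloccipital"]),
   (34, ["lingual"]),
   (23, ["cuneus"]),
   (32, ["pericalcarine"]),
   (20, ["rostralanteriorcingulate", "caudalanteriorcingulate"]),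
   (22, ["posteriorcingulate", "isthmuscingulate"]),
   (29, ["insula"])]

def pvPrefixes : List (String × Int) := [("lh_", 0), ("rh_", 74)]

-- inner loop "for value, names in _GROUPS: if bare in names: return value + offset"
def pvScanGroups : List (Int × List String) → String → Option Int
  | [], _ => none
  | (v, names) :: rest, bare => if bare ∈ names then some v else pvScanGroups rest bare

-- outer loop "for prefix, offset in _PREFIXES: if label.startswith(prefix): …"
def pvTryPrefixes : List (String × Int) → String → Int
  | [], _ => 0
  | (pre, off) :: rest, label =>
    if PySem.Str.startswith label pre then
      match pvScanGroups pvGroups (PySem.Str.slice label (some (pre.length : Int)) none) with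
      | some v => v + off
      | none => 0
    else pvTryPrefixes rest label

def get_aparc_to_destrieux_mapping_alt (aparc_label : String) : Int :=
  pvTryPrefixes pvPrefixes aparc_label

-- ===== PRECONDITION & SPEC =====
def Spec_get_aparc_to_destrieux_mapping (aparc_label : String) (out : Int) : Prop := out = get_aparc_to_destrieux_mapping_alt aparc_label
instance (aparc_label : String) (out : Int) : Decidable (Spec_get_aparc_to_destrieux_mapping aparc_label out) := by unfold Spec_get_aparc_to_destrieux_mapping; infer_instance

-- ===== CLAIM (what is proved, stated in full; the proofs are below) =====
def Claim_equal_get_aparc_to_destrieux_mapping : Prop := ∀ (aparc_label : String), Dom_get_aparc_to_destrieux_mapping aparc_label → Spec_get_aparc_to_destrieux_mapping aparc_label (get_aparc_to_destrieux_mapping aparc_label)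

-- ===== LEMMAS AND PROOFS =====

-- first-match association-list lookup on char-list keys (proof tool)
def pvLookup : List (List Char × Int) → List Char → Option Int
  | [], _ => none
  | (k, v) :: rest, cs => if k = cs then some v else pvLookup rest cs

-- the base table, keys as char lists, in A's insertion order (used only by the proofs)
def pvBaseL : List (List Char × Int) :=
  [("superiorfrontal".toList, 28),
   ("rostralmiddlefrontal".toList, 27),
   ("caudalmiddlefrontal".toList, 27),
   ("parsopercularis".toList, 24),
   ("parstriangularis".toList, 26),
   ("parsorbitalis".toList, 25),
   ("lateralorbitofrontal".toList, 36),
   ("medialorbitofrontal".toList, 43),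
   ("precentral".toList, 41),
   ("paracentral".toList, 17),
   ("frontalpole".toList, 19),
   ("superiorparietal".toList, 39),
   ("inferiorparietal".toList, 37),
   ("supramarginal".toList, 38),
   ("postcentral".toList, 40),
   ("precuneus".toList, 42),
   ("superiortemporal".toList, 46),
   ("middletemporal".toList, 50),
   ("inferiortemporal".toList, 49),
   ("bankssts".toList, 45),
   ("fusiform".toList, 33),
   ("transversetemporal".toList, 45),
   ("entorhinal".toList, 21),
   ("temporalpole".toList, 47),
   ("parahippocampal".toList, 35),
   ("lateraloccipital".toList, 31),
   ("lingual".toList, 34),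
   ("cuneus".toList, 23),
   ("pericalcarine".toList, 32),
   ("rostralanteriorcingulate".toList, 20),
   ("caudalanteriorcingulate".toList, 20),
   ("posteriorcingulate".toList, 22),
   ("isthmuscingulate".toList, 22),
   ("insula".toList, 29)]

-- B's grouped table flattened to a char-list association list (proof tool)
def pvFlat : List (List Char × Int) :=
  pvGroups.flatMap (fun g => g.2.map (fun n => (n.toList, g.1)))

theorem pv_str_eq_iff (s t : String) : s = t ↔ s.toList = t.toList := by
  constructor
  · intro h; rw [h]
  · intro h; apply String.ext; simpa [String.toList] using h

theorem pv_str_beq (s t : String) : (s == t) = (s.toList == t.toList) := by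
  simp [String.toList, String.ext_iff]

theorem pv_slice3 (s : String) : (PySem.Str.slice s (some 3) none).toList = s.toList.drop 3 := by
  have h := PySem.List.slice_from (xs := s.toList) (a := (3 : Int)) (by norm_num)
  simpa using h

theorem pv_get?_eq_mk (items : List (String × Int)) (s : String) :
    (PySem.Dict.mk items).get? s = pvLookup (items.map (fun p => (p.1.toList, p.2))) s.toList := by
  induction items with
  | nil => rfl
  | cons p rest ih =>
    obtain ⟨k, v⟩ := p
    simp only [PySem.Dict.get?_mk_cons, pvLookup, List.map_cons, ih, pv_str_beq, beq_iff_eq]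

theorem pv_get?_eq (d : PySem.Dict String Int) (s : String) :
    d.get? s = pvLookup (d.items.map (fun p => (p.1.toList, p.2))) s.toList := by
  obtain ⟨items⟩ := d
  exact pv_get?_eq_mk items s

theorem pv_lookup_append (xs ys : List (List Char × Int)) (cs : List Char) :
    pvLookup (xs ++ ys) cs =
      (match pvLookup xs cs with
       | some v => some v
       | none => pvLookup ys cs) := by
  induction xs with
  | nil => simp [pvLookup]
  | cons p rest ih =>
    obtain ⟨k, v⟩ := p
    by_cases h : k = cs <;> simp [pvLookup, h, ih]

theorem pv_lookup_map_pre (base : List (List Char × Int)) (pre t : List Char) (g : Int → Int) :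
    pvLookup (base.map (fun p => (pre ++ p.1, g p.2))) (pre ++ t) =
      (pvLookup base t).map g := by
  induction base with
  | nil => simp [pvLookup]
  | cons p rest ih =>
    obtain ⟨k, v⟩ := p
    by_cases h : k = t
    · simp [pvLookup, h]
    · have h2 : ¬ (pre ++ k = pre ++ t) := by simpa using h
      simp [pvLookup, h, h2, ih]

theorem pv_lookup_map_pre_none (base : List (List Char × Int)) (pre : List Char) (cs : List Char)
    (g : Int → Int) (h : ∀ ks, cs ≠ pre ++ ks) :
    pvLookup (base.map (fun p => (pre ++ p.1, g p.2))) cs = none := by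
  induction base with
  | nil => simp [pvLookup]
  | cons p rest ih =>
    obtain ⟨k, v⟩ := p
    have h2 : ¬ (pre ++ k = cs) := fun hh => h k hh.symm
    simp [pvLookup, h2, ih]

theorem pv_lookup_pre_id (base : List (List Char × Int)) (pre t : List Char) :
    pvLookup (base.map (fun p => (pre ++ p.1, p.2))) (pre ++ t) = pvLookup base t := by
  simpa using pv_lookup_map_pre base pre t (fun v => v)

theorem pv_lookup_pre_add (base : List (List Char × Int)) (pre t : List Char) (k : Int) :
    pvLookup (base.map (fun p => (pre ++ p.1, p.2 + k))) (pre ++ t) =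
      (pvLookup base t).map (· + k) := by
  simpa using pv_lookup_map_pre base pre t (fun v => v + k)

-- proof tool: the base table as a plain list of pairs (same literal as in port A)
def pvBaseStr : List (String × Int) :=
  [("lh_superiorfrontal", 28),
   ("lh_rostralmiddlefrontal", 27),
   ("lh_caudalmiddlefrontal", 27),
   ("lh_parsopercularis", 24),
   ("lh_parstriangularis", 26),
   ("lh_parsorbitalis", 25),
   ("lh_lateralorbitofrontal", 36),
   ("lh_medialorbitofrontal", 43),
   ("lh_precentral", 41),
   ("lh_paracentral", 17),
   ("lh_frontalpole", 19),
   ("lh_superiorparietal", 39),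
   ("lh_inferiorparietal", 37),
   ("lh_supramarginal", 38),
   ("lh_postcentral", 40),
   ("lh_precuneus", 42),
   ("lh_superiortemporal", 46),
   ("lh_middletemporal", 50),
   ("lh_inferiortemporal", 49),
   ("lh_bankssts", 45),
   ("lh_fusiform", 33),
   ("lh_transversetemporal", 45),
   ("lh_entorhinal", 21),
   ("lh_temporalpole", 47),
   ("lh_parahippocampal", 35),
   ("lh_lateraloccipital", 31),
   ("lh_lingual", 34),
   ("lh_cuneus", 23),
   ("lh_pericalcarine", 32),
   ("lh_rostralanteriorcingulate", 20),
   ("lh_caudalanteriorcingulate", 20),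
   ("lh_posteriorcingulate", 22),
   ("lh_isthmuscingulate", 22),
   ("lh_insula", 29)]

-- updating a dict with fresh, pairwise-distinct keys appends the pairs (kernel-cheap
-- replacement for evaluating the insert fold)
theorem pv_update_fresh {κ ν : Type} [BEq κ] [LawfulBEq κ] (l : List (κ × ν)) (d : PySem.Dict κ ν)
    (h1 : ∀ p ∈ l, d.contains p.1 = false) (h2 : (l.map Prod.fst).Nodup) :
    (d.update l).items = d.items ++ l := by
  induction l generalizing d with
  | nil => simp [PySem.Dict.update]
  | cons p rest ih =>
    obtain ⟨k, v⟩ := p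
    simp only [List.map_cons, List.nodup_cons, List.mem_map] at h2
    have hc : d.contains k = false := h1 (k, v) (List.mem_cons_self ..)
    have hstep : PySem.Dict.update d ((k, v) :: rest) = PySem.Dict.update (d.insert k v) rest := rfl
    rw [hstep, ih]
    · rw [PySem.Dict.items_insert_of_not_contains d v hc]
      simp
    · intro q hq
      rw [PySem.Dict.contains_insert]
      have hne : ¬ (q.1 == k) := by
        intro hh
        exact h2.1 ⟨q, hq, eq_of_beq hh⟩
      simp only [Bool.or_eq_false_iff]
      exact ⟨by simpa using hne, h1 q (List.mem_cons_of_mem _ hq)⟩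
    · exact h2.2

theorem pv_base_items : pvAparcToDestrieuxBase.items = pvBaseStr := by
  have h : (PySem.Dict.empty.update pvBaseStr).items = PySem.Dict.empty.items ++ pvBaseStr := by
    apply pv_update_fresh
    · intro p _
      exact PySem.Dict.contains_empty p.1
    · decide
  simpa [PySem.Dict.empty] using h

theorem pv_base_eq_mk : pvAparcToDestrieuxBase = PySem.Dict.mk pvBaseStr :=
  PySem.Dict.ext pv_base_items

-- A's expansion loop: the if-guard always fires, and the 34 fresh rh_ keys append
theorem pv_full_items_str :
    pvAparcToDestrieuxFull.items =
      pvBaseStr ++ pvBaseStr.map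
        (fun kv => (PySem.Str.replace kv.1 "lh_" "rh_", kv.2 + 74)) := by
  have h0 : pvAparcToDestrieuxFull =
      pvBaseStr.foldl
        (fun acc kv =>
          if PySem.Str.startswith kv.1 "lh_" then
            acc.insert (PySem.Str.replace kv.1 "lh_" "rh_") (kv.2 + 74)
          else acc)
        (PySem.Dict.mk pvBaseStr) := by
    unfold pvAparcToDestrieuxFull
    rw [pv_base_items, pv_base_eq_mk]
  have h1 : pvAparcToDestrieuxFull =
      pvBaseStr.foldl
        (fun acc kv => acc.insert (PySem.Str.replace kv.1 "lh_" "rh_") (kv.2 + 74))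
        (PySem.Dict.mk pvBaseStr) := by
    rw [h0]
    apply PySem.List.foldl_congr_mem
    intro acc kv hkv
    have hs : PySem.Str.startswith kv.1 "lh_" = true := by
      fin_cases hkv <;> decide
    rw [hs, if_pos rfl]
  rw [h1]
  have h2 := PySem.Dict.items_foldl_insert_fresh
    (l := pvBaseStr)
    (k := fun kv => PySem.Str.replace kv.1 "lh_" "rh_")
    (v := fun kv => kv.2 + 74)
    (d := PySem.Dict.mk pvBaseStr)
    (by decide) (by decide)
  simpa using h2

-- the same, keyed as char lists, split into lh_ and rh_ halves
theorem pv_map_lh : pvBaseStr.map (fun p => (p.1.toList, p.2)) =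
    pvBaseL.map (fun p => (['l', 'h', '_'] ++ p.1, p.2)) := by decide

theorem pv_map_rh : (pvBaseStr.map
      (fun kv => (PySem.Str.replace kv.1 "lh_" "rh_", kv.2 + 74))).map (fun p => (p.1.toList, p.2)) =
    pvBaseL.map (fun p => (['r', 'h', '_'] ++ p.1, p.2 + 74)) := by decide

theorem pv_full_items :
    pvAparcToDestrieuxFull.items.map (fun p => (p.1.toList, p.2)) =
      pvBaseL.map (fun p => (['l', 'h', '_'] ++ p.1, p.2)) ++
        pvBaseL.map (fun p => (['r', 'h', '_'] ++ p.1, p.2 + 74)) := by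
  rw [pv_full_items_str, List.map_append, pv_map_lh, pv_map_rh]

-- membership lookup in one group's name list
theorem pv_lookup_names (ns : List String) (v : Int) (s : String) :
    pvLookup (ns.map (fun n => (n.toList, v))) s.toList =
      (if s ∈ ns then some v else none) := by
  induction ns with
  | nil => simp [pvLookup]
  | cons n rest ih =>
    by_cases h : n = s
    · simp [pvLookup, h]
    · have h2 : ¬ (n.toList = s.toList) := fun hh => h ((pv_str_eq_iff n s).mpr hh)
      simp [pvLookup, h2, ih, Ne.symm h]

-- the grouped scan is the lookup in the flattened association list
theorem pv_scan_eq_flat (gs : List (Int × List String)) (s : String) :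
    pvScanGroups gs s =
      pvLookup (gs.flatMap (fun g => g.2.map (fun n => (n.toList, g.1)))) s.toList := by
  induction gs with
  | nil => simp [pvScanGroups, pvLookup]
  | cons g rest ih =>
    obtain ⟨v, ns⟩ := g
    simp only [pvScanGroups, List.flatMap_cons, pv_lookup_append, pv_lookup_names]
    by_cases h : s ∈ ns <;> simp [h, ih]

-- proof tool: pvBaseL split around the fusiform/transversetemporal pair
def pvBaseFront : List (List Char × Int) := pvBaseL.take 20
def pvBaseBack : List (List Char × Int) := pvBaseL.drop 22

-- pvFlat is pvBaseL with the adjacent fusiform/transversetemporal entries swapped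
theorem pv_flat_eq : pvFlat =
    pvBaseFront ++ ("transversetemporal".toList, 45) :: ("fusiform".toList, 33) :: pvBaseBack := by
  set_option maxRecDepth 10000 in rfl

theorem pv_base_eq : pvBaseL =
    pvBaseFront ++ ("fusiform".toList, 33) :: ("transversetemporal".toList, 45) :: pvBaseBack := by
  set_option maxRecDepth 10000 in rfl

-- swapping two adjacent entries with distinct keys does not change the lookup
theorem pv_lookup_swap (A B : List (List Char × Int)) (p q : List Char × Int)
    (h : p.1 ≠ q.1) (cs : List Char) :
    pvLookup (A ++ p :: q :: B) cs = pvLookup (A ++ q :: p :: B) cs := by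
  rw [pv_lookup_append, pv_lookup_append]
  cases pvLookup A cs with
  | some v => rfl
  | none =>
    obtain ⟨k1, v1⟩ := p
    obtain ⟨k2, v2⟩ := q
    simp only at h
    by_cases h1 : k1 = cs
    · have h2 : ¬ (k2 = cs) := fun hh => h (h1.trans hh.symm)
      simp [pvLookup, h1, h2]
    · by_cases h2 : k2 = cs <;> simp [pvLookup, h1, h2]

theorem pv_scan_eq_base (s : String) :
    pvScanGroups pvGroups s = pvLookup pvBaseL s.toList := by
  have h1 : pvScanGroups pvGroups s = pvLookup pvFlat s.toList := pv_scan_eq_flat pvGroups s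
  rw [h1, pv_flat_eq, pv_base_eq]
  exact pv_lookup_swap pvBaseFront pvBaseBack _ _ (by decide) s.toList

theorem pv_len_lh : (("lh_".length : Int)) = 3 := by decide

theorem pv_len_rh : (("rh_".length : Int)) = 3 := by decide

theorem pv_main (s : String) :
    get_aparc_to_destrieux_mapping s = get_aparc_to_destrieux_mapping_alt s := by
  by_cases hl : PySem.Str.startswith s "lh_" = true
  · -- left-hemisphere labels: B's prefix loop stops at its first entry
    have hp : ("lh_".toList) <+: s.toList := by
      simpa [PySem.Chars.startswith_iff] using hl
    obtain ⟨ks, hks⟩ := hp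
    have hks' : s.toList = ['l', 'h', '_'] ++ ks := by simpa using hks.symm
    have hsum : s ∉ pvSummaryMeasures := by
      simp [pvSummaryMeasures, pv_str_eq_iff, hks']
    have hdrop : s.toList.drop 3 = ks := by simp [hks']
    have hA : get_aparc_to_destrieux_mapping s =
        (match pvLookup pvBaseL ks with
         | some v => v
         | none => 0) := by
      simp only [get_aparc_to_destrieux_mapping, if_neg hsum, pv_get?_eq, pv_full_items,
        pv_lookup_append]
      rw [hks', pv_lookup_pre_id]
      cases pvLookup pvBaseL ks <;> rfl
    have hB : get_aparc_to_destrieux_mapping_alt s =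
        (match pvLookup pvBaseL ks with
         | some v => v + 0
         | none => 0) := by
      simp only [get_aparc_to_destrieux_mapping_alt, pvPrefixes, pvTryPrefixes, hl, if_true]
      rw [pv_len_lh, pv_scan_eq_base, pv_slice3, hdrop]
    rw [hA, hB]
    cases pvLookup pvBaseL ks <;> simp
  · by_cases hr : PySem.Str.startswith s "rh_" = true
    · -- right-hemisphere labels: B's prefix loop falls through to its second entry
      have hp : ("rh_".toList) <+: s.toList := by
        simpa [PySem.Chars.startswith_iff] using hr
      obtain ⟨ks, hks⟩ := hp
      have hks' : s.toList = ['r', 'h', '_'] ++ ks := by simpa using hks.symm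
      have hsum : s ∉ pvSummaryMeasures := by
        simp [pvSummaryMeasures, pv_str_eq_iff, hks']
      have hdrop : s.toList.drop 3 = ks := by simp [hks']
      have hlh : ∀ t, s.toList ≠ ['l', 'h', '_'] ++ t := by
        intro t h
        rw [hks'] at h
        simp at h
      have hA : get_aparc_to_destrieux_mapping s =
          (match (pvLookup pvBaseL ks).map (fun v => v + 74) with
           | some v => v
           | none => 0) := by
        simp only [get_aparc_to_destrieux_mapping, if_neg hsum, pv_get?_eq, pv_full_items,
          pv_lookup_append,
          pv_lookup_map_pre_none pvBaseL ['l', 'h', '_'] s.toList (fun v => v) hlh]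
        rw [hks', pv_lookup_pre_add]
      have hB : get_aparc_to_destrieux_mapping_alt s =
          (match pvLookup pvBaseL ks with
           | some v => v + 74
           | none => 0) := by
        simp only [get_aparc_to_destrieux_mapping_alt, pvPrefixes, pvTryPrefixes, hl, hr,
          if_true, if_false, Bool.false_eq_true]
        rw [pv_len_rh, pv_scan_eq_base, pv_slice3, hdrop]
      rw [hA, hB]
      cases pvLookup pvBaseL ks <;> rfl
    · -- no hemisphere prefix: both sides are 0
      have hnl : ∀ t, s.toList ≠ ['l', 'h', '_'] ++ t := by
        intro t h
        refine hl ?_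
        simp only [PySem.Str.startswith_eq, String.toList, PySem.Chars.startswith_iff]
        exact ⟨t, by simpa using h.symm⟩
      have hnr : ∀ t, s.toList ≠ ['r', 'h', '_'] ++ t := by
        intro t h
        refine hr ?_
        simp only [PySem.Str.startswith_eq, String.toList, PySem.Chars.startswith_iff]
        exact ⟨t, by simpa using h.symm⟩
      have hB : get_aparc_to_destrieux_mapping_alt s = 0 := by
        simp only [get_aparc_to_destrieux_mapping_alt, pvPrefixes, pvTryPrefixes]
        rw [if_neg hl, if_neg hr]
      rw [hB]
      by_cases hs : s ∈ pvSummaryMeasures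
      · simp [get_aparc_to_destrieux_mapping, hs]
      · simp only [get_aparc_to_destrieux_mapping, if_neg hs, pv_get?_eq, pv_full_items,
          pv_lookup_append,
          pv_lookup_map_pre_none pvBaseL ['l', 'h', '_'] s.toList (fun v => v) hnl,
          pv_lookup_map_pre_none pvBaseL ['r', 'h', '_'] s.toList (fun v => v + 74) hnr]

-- ===== VERDICT (by name: the statement is the Claim_ definition above) =====
theorem get_aparc_to_destrieux_mapping_spec : Claim_equal_get_aparc_to_destrieux_mapping := by
  intro s _
  exact pv_main s
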